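-- pv_equiv track=rewrite | github.com/nityarai08/openclaw | skills/sanatani-astrology/sanatani_astrology/astro_core/kundali_generator/ephemeris_kundali_generator.py | _calculate_house_aspects
-- ===== SOURCE A (Python) =====
-- from typing import Dict, List, Optional, Any, Tuple
--
-- def _calculate_house_aspects(chart_positions: Dict[str, Any]) -> Dict[int, List[str]]:
--     """Calculate which planets aspect each house."""
--     aspects_on_houses = {i: [] for i in range(1, 13)}
--
--     aspect_rules = {
--         'mars': [4, 7, 8],
--         'jupiter': [5, 7, 9],
--         'saturn': [3, 7, 10],
--         'sun': [7], 'moon': [7], 'mercury': [7], 'venus': [7]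
--     }
--
--     for planet_name, aspect_list in aspect_rules.items():
--         if planet_name not in chart_positions:
--             continue
--
--         planet_pos = chart_positions[planet_name]
--         planet_house = planet_pos.get('house')
--         if not planet_house:
--             continue
--
--         for aspect in aspect_list:
--             aspected_house_num = (planet_house + aspect - 1) % 12
--             if aspected_house_num == 0:
--                 aspected_house_num = 12
--
--             if planet_name not in aspects_on_houses[aspected_house_num]:
--                 aspects_on_houses[aspected_house_num].append(planet_name)
--
--     return aspects_on_houses
-- ===== SOURCE B (Python) =====
-- def _calculate_house_aspects(chart_positions):
--     """Calculate which planets aspect each house (gather per house instead of scatter per planet)."""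
--     aspect_rules = {
--         'mars': [4, 7, 8],
--         'jupiter': [5, 7, 9],
--         'saturn': [3, 7, 10],
--         'sun': [7], 'moon': [7], 'mercury': [7], 'venus': [7]
--     }
--
--     houses = {}
--     for planet in aspect_rules:
--         pos = chart_positions.get(planet)
--         if pos is not None:
--             h = pos.get('house')
--             if h:
--                 houses[planet] = h
--
--     return {house: [planet for planet, aspects in aspect_rules.items()
--                     if planet in houses
--                     and any((houses[planet] + a - 1) % 12 == house % 12 for a in aspects)]
--             for house in range(1, 13)}
-- ===== Notes on version B (the rewrite author's own statement) =====
-- stated objective: alternative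
-- what changed: Inverts the loop nesting: instead of scattering each planet's aspects into a mutable per-house dict (with a membership dedup check), B precomputes each planet's effective house once and then builds the result by gathering, for each house 1..12, the planets whose aspect offsets hit it.
import Mathlib
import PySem

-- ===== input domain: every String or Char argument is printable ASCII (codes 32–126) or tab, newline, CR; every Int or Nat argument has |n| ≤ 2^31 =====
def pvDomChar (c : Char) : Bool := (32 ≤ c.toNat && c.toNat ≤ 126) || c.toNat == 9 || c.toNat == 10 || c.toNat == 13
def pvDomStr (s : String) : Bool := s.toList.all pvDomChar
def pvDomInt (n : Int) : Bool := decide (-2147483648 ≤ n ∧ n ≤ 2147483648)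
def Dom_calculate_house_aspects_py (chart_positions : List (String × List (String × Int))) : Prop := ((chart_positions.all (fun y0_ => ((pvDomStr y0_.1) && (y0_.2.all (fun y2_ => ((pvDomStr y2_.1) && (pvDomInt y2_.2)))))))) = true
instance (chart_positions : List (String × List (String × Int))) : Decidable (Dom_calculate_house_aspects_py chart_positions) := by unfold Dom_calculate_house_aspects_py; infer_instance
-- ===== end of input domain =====

-- B inverts A's nesting: A scatters each planet into a mutable per-house dict; B gathers,
-- for each house 1..12, the planets whose aspect offsets hit it (alternative decomposition, same cost).

-- ===== PORT A =====
-- the literal aspect_rules dict (shared literal of both Python sources)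
def pvRules : List (String × List Int) :=
  [("mars", [4, 7, 8]), ("jupiter", [5, 7, 9]), ("saturn", [3, 7, 10]),
   ("sun", [7]), ("moon", [7]), ("mercury", [7]), ("venus", [7])]

def calculate_house_aspects_py (chart_positions : List (String × List (String × Int))) : List (Int × List String) :=
  -- aspects_on_houses = {i: [] for i in range(1, 13)}
  let init : PySem.Dict Int (List String) :=
    (PySem.List.pyRange 1 13 1).foldl (fun d i => d.insert i []) PySem.Dict.empty
  (pvRules.foldl (fun acc pr =>
      match (PySem.Dict.mk chart_positions).get? pr.1 with
      | none => acc            -- planet_name not in chart_positions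
      | some planet_pos =>
        match (PySem.Dict.mk planet_pos).get? "house" with
        | none => acc          -- planet_pos.get('house') is None
        | some planet_house =>
          if planet_house = 0 then acc   -- falsy house
          else pr.2.foldl (fun acc2 aspect =>
            let t0 := PySem.Int.mod (planet_house + aspect - 1) 12
            let t := if t0 = 0 then 12 else t0
            -- key t is always one of 1..12, so aspects_on_houses[t] never raises: getD is exact here
            if (acc2.getD t []).contains pr.1 then acc2
            else acc2.insert t (acc2.getD t [] ++ [pr.1])) acc) init).items

-- ===== PORT B =====
-- houses = {planet: truthy house} precomputed once
def pvAltHouses (chart_positions : List (String × List (String × Int))) : PySem.Dict String Int :=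
  pvRules.foldl (fun d pr =>
    match (PySem.Dict.mk chart_positions).get? pr.1 with
    | none => d
    | some pos =>
      match (PySem.Dict.mk pos).get? "house" with
      | none => d
      | some h => if h = 0 then d else d.insert pr.1 h) PySem.Dict.empty

def calculate_house_aspects_py_alt (chart_positions : List (String × List (String × Int))) : List (Int × List String) :=
  let houses := pvAltHouses chart_positions
  (PySem.List.pyRange 1 13 1).map (fun house =>
    (house, (pvRules.filter (fun pr =>
        match houses.get? pr.1 with
        | none => false
        | some ph => pr.2.any (fun a =>
            PySem.Int.mod (ph + a - 1) 12 == PySem.Int.mod house 12))).map Prod.fst))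

-- ===== PRECONDITION & SPEC =====
def Spec_calculate_house_aspects_py (chart_positions : List (String × List (String × Int))) (out : List (Int × List String)) : Prop := out = calculate_house_aspects_py_alt chart_positions
instance (chart_positions : List (String × List (String × Int))) (out : List (Int × List String)) : Decidable (Spec_calculate_house_aspects_py chart_positions out) := by unfold Spec_calculate_house_aspects_py; infer_instance

-- ===== CLAIM (what is proved, stated in full; the proofs are below) =====
def Claim_equal_calculate_house_aspects_py : Prop := ∀ (chart_positions : List (String × List (String × Int))), Dom_calculate_house_aspects_py chart_positions → Spec_calculate_house_aspects_py chart_positions (calculate_house_aspects_py chart_positions)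

-- ===== LEMMAS AND PROOFS =====

-- the twelve houses, the effective ("truthy") house of a planet, and the target house of one aspect
def H12 : List Int := [1, 2, 3, 4, 5, 6, 7, 8, 9, 10, 11, 12]

def pvHouse (chart : List (String × List (String × Int))) (p : String) : Option Int :=
  match (PySem.Dict.mk chart).get? p with
  | none => none
  | some pos =>
    match (PySem.Dict.mk pos).get? "house" with
    | none => none
    | some h => if h = 0 then none else some h

def tgt (v a : Int) : Int :=
  if PySem.Int.mod (v + a - 1) 12 = 0 then 12 else PySem.Int.mod (v + a - 1) 12

def dOf (g : Int → List String) : PySem.Dict Int (List String) :=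
  PySem.Dict.mk (H12.map (fun h => (h, g h)))

-- named forms of the loop bodies (definitionally equal to the ports' lambdas)
def stepI (p : String) (v : Int) (acc2 : PySem.Dict Int (List String)) (aspect : Int) :
    PySem.Dict Int (List String) :=
  if (acc2.getD (tgt v aspect) []).contains p then acc2
  else acc2.insert (tgt v aspect) (acc2.getD (tgt v aspect) [] ++ [p])

def stepO (chart : List (String × List (String × Int)))
    (acc : PySem.Dict Int (List String)) (pr : String × List Int) :
    PySem.Dict Int (List String) :=
  match pvHouse chart pr.1 with
  | none => acc
  | some v => pr.2.foldl (stepI pr.1 v) acc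

def stepH (chart : List (String × List (String × Int)))
    (d : PySem.Dict String Int) (pr : String × List Int) : PySem.Dict String Int :=
  match pvHouse chart pr.1 with
  | none => d
  | some v => d.insert pr.1 v

def gather (chart : List (String × List (String × Int))) (rules : List (String × List Int)) (h : Int) : List String :=
  (rules.filter (fun pr =>
    match pvHouse chart pr.1 with
    | none => false
    | some v => pr.2.any (fun a => tgt v a == h))).map Prod.fst

-- A's (and B's) nested match-with-falsy-check equals the pvHouse-directed form
lemma stepO_eq (chart : List (String × List (String × Int))) (acc : PySem.Dict Int (List String))
    (pr : String × List Int) :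
    (match (PySem.Dict.mk chart).get? pr.1 with
     | none => acc
     | some planet_pos =>
       match (PySem.Dict.mk planet_pos).get? "house" with
       | none => acc
       | some planet_house =>
         if planet_house = 0 then acc
         else pr.2.foldl (stepI pr.1 planet_house) acc) = stepO chart acc pr := by
  unfold stepO pvHouse
  cases (PySem.Dict.mk chart).get? pr.1 with
  | none => rfl
  | some pos =>
    show (match (PySem.Dict.mk pos).get? "house" with
          | none => acc
          | some planet_house =>
            if planet_house = 0 then acc
            else pr.2.foldl (stepI pr.1 planet_house) acc)
        = (match (match (PySem.Dict.mk pos).get? "house" with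
                  | none => none
                  | some h => if h = 0 then none else some h : Option Int) with
           | none => acc
           | some v => pr.2.foldl (stepI pr.1 v) acc)
    cases (PySem.Dict.mk pos).get? "house" with
    | none => rfl
    | some h0 => by_cases h00 : h0 = 0 <;> simp [h00]

lemma stepH_eq (chart : List (String × List (String × Int))) (d : PySem.Dict String Int)
    (pr : String × List Int) :
    (match (PySem.Dict.mk chart).get? pr.1 with
     | none => d
     | some pos =>
       match (PySem.Dict.mk pos).get? "house" with
       | none => d
       | some h => if h = 0 then d else d.insert pr.1 h) = stepH chart d pr := by
  unfold stepH pvHouse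
  cases (PySem.Dict.mk chart).get? pr.1 with
  | none => rfl
  | some pos =>
    show (match (PySem.Dict.mk pos).get? "house" with
          | none => d
          | some h => if h = 0 then d else d.insert pr.1 h)
        = (match (match (PySem.Dict.mk pos).get? "house" with
                  | none => none
                  | some h => if h = 0 then none else some h : Option Int) with
           | none => d
           | some v => d.insert pr.1 v)
    cases (PySem.Dict.mk pos).get? "house" with
    | none => rfl
    | some h0 => by_cases h00 : h0 = 0 <;> simp [h00]

lemma tgt_bounds (v a : Int) : 1 ≤ tgt v a ∧ tgt v a ≤ 12 := by
  have h1 := PySem.Int.mod_nonneg (v + a - 1) (b := 12) (by omega)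
  have h2 := PySem.Int.mod_lt (v + a - 1) (b := 12) (by omega)
  unfold tgt; split_ifs <;> omega

lemma dOf_getD {g : Int → List String} {t : Int} (h1 : 1 ≤ t) (h2 : t ≤ 12) :
    (dOf g).getD t [] = g t := by
  interval_cases t <;> rfl

lemma dOf_insert {g : Int → List String} {t : Int} (h1 : 1 ≤ t) (h2 : t ≤ 12) (x : List String) :
    (dOf g).insert t x = dOf (fun h => if h = t then x else g h) := by
  interval_cases t <;> (apply PySem.Dict.ext; simp [dOf, H12, PySem.Dict.insert])

lemma dOf_congr {g g' : Int → List String} (h : ∀ h, g h = g' h) : dOf g = dOf g' := by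
  unfold dOf; congr 1; exact List.map_congr_left (fun x _ => by rw [h])

-- inner loop (over one planet's aspect list) on a dict in dOf form
lemma inner_fold (p : String) (v : Int) (aspects : List Int) :
    ∀ g : Int → List String,
    aspects.foldl (stepI p v) (dOf g)
    = dOf (fun h => if p ∉ g h ∧ aspects.any (fun a => tgt v a == h) then g h ++ [p] else g h) := by
  induction aspects with
  | nil =>
    intro g; simp only [List.foldl_nil, List.any_nil]
    exact (dOf_congr (fun h => by simp)).symm
  | cons a rest ih =>
    intro g
    simp only [List.foldl_cons]
    have hb := tgt_bounds v a
    have hgd : (dOf g).getD (tgt v a) [] = g (tgt v a) := dOf_getD hb.1 hb.2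
    by_cases hmem : p ∈ g (tgt v a)
    · have hstep : stepI p v (dOf g) a = dOf g := by
        unfold stepI; rw [hgd]
        simp [List.contains_eq_mem, hmem]
      rw [hstep, ih g]
      apply dOf_congr
      intro h
      by_cases he : h = tgt v a
      · subst he; simp [hmem]
      · have : (tgt v a == h) = false := by simp; omega
        simp [List.any_cons, this]
    · have hstep : stepI p v (dOf g) a
          = dOf (fun h => if h = tgt v a then g (tgt v a) ++ [p] else g h) := by
        unfold stepI; rw [hgd]
        simp only [List.contains_eq_mem, hmem, decide_false, Bool.false_eq_true, if_false]
        exact dOf_insert hb.1 hb.2 _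
      rw [hstep, ih]
      apply dOf_congr
      intro h
      by_cases he : h = tgt v a
      · subst he
        simp [hmem]
      · have : (tgt v a == h) = false := by simp; omega
        simp [List.any_cons, this, he]

-- outer loop (over the rule list) on a dict in dOf form
lemma outer_fold (chart : List (String × List (String × Int))) (rules : List (String × List Int)) :
    ∀ g : Int → List String, (∀ pr ∈ rules, ∀ h, pr.1 ∉ g h) → (rules.map Prod.fst).Nodup →
    rules.foldl (stepO chart) (dOf g) = dOf (fun h => g h ++ gather chart rules h) := by
  induction rules with
  | nil =>
    intro g _ _; simp only [List.foldl_nil]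
    exact (dOf_congr (fun h => by simp [gather])).symm
  | cons pr rest ih =>
    intro g hg hnd
    simp only [List.foldl_cons]
    have hnd' : (rest.map Prod.fst).Nodup := (List.nodup_cons.mp hnd).2
    have hprnot : pr.1 ∉ rest.map Prod.fst := (List.nodup_cons.mp hnd).1
    rcases hv : pvHouse chart pr.1 with _ | v
    · have hstep : stepO chart (dOf g) pr = dOf g := by unfold stepO; rw [hv]
      rw [hstep, ih g (fun q hq h => hg q (List.mem_cons_of_mem _ hq) h) hnd']
      apply dOf_congr; intro h
      simp [gather, hv]
    · have hstep : stepO chart (dOf g) pr = pr.2.foldl (stepI pr.1 v) (dOf g) := by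
        unfold stepO; rw [hv]
      rw [hstep, inner_fold pr.1 v pr.2 g]
      set g1 : Int → List String :=
        fun h => if pr.1 ∉ g h ∧ pr.2.any (fun a => tgt v a == h) then g h ++ [pr.1] else g h with hg1
      have hg1rest : ∀ q ∈ rest, ∀ h, q.1 ∉ g1 h := by
        intro q hq h
        have hq1 : q.1 ≠ pr.1 := by
          intro he; exact hprnot (he ▸ List.mem_map_of_mem hq)
        have := hg q (List.mem_cons_of_mem _ hq) h
        simp only [hg1]; split_ifs <;> simp_all
      rw [ih g1 hg1rest hnd']
      apply dOf_congr; intro h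
      have hpg := hg pr (List.mem_cons_self) h
      simp only [gather, List.filter_cons, hv, hg1]
      by_cases hhit : pr.2.any (fun a => tgt v a == h) = true
      · simp [hhit, hpg, List.append_assoc]
      · simp [hhit, hpg]

-- B's precomputed houses agree with pvHouse on every rule name
lemma altHouses_get (chart : List (String × List (String × Int))) (rules : List (String × List Int)) :
    ∀ (d : PySem.Dict String Int) (p : String), p ∈ rules.map Prod.fst → (rules.map Prod.fst).Nodup →
    (rules.foldl (stepH chart) d).get? p
    = match pvHouse chart p with
      | none => d.get? p
      | some v => some v := by
  induction rules with
  | nil => intro d p hp _; simp at hp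
  | cons pr rest ih =>
    intro d p hp hnd
    have hnd' : (rest.map Prod.fst).Nodup := (List.nodup_cons.mp hnd).2
    have hprnot : pr.1 ∉ rest.map Prod.fst := (List.nodup_cons.mp hnd).1
    simp only [List.foldl_cons]
    -- frame: the fold over rest does not touch keys outside rest's names
    have frame : ∀ (d' : PySem.Dict String Int) (q : String), q ∉ rest.map Prod.fst →
        (rest.foldl (stepH chart) d').get? q = d'.get? q := by
      clear ih hp hnd hnd' hprnot
      induction rest with
      | nil => intro d' q _; rfl
      | cons r rs ihf =>
        intro d' q hq
        simp only [List.map_cons, List.mem_cons, not_or] at hq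
        simp only [List.foldl_cons]
        rw [ihf _ _ hq.2]
        unfold stepH
        rcases pvHouse chart r.1 with _ | v
        · rfl
        · exact PySem.Dict.get?_insert_of_ne _ _ hq.1
    rw [List.map_cons] at hp
    rcases List.mem_cons.mp hp with he | hmem
    · subst he
      rw [frame _ _ hprnot]
      unfold stepH
      rcases pvHouse chart pr.1 with _ | v
      · rfl
      · exact PySem.Dict.get?_insert_self _ _ _
    · have hne : p ≠ pr.1 := by
        intro he; subst he
        exact hprnot hmem
      rw [ih _ _ hmem hnd']
      have hstep : (stepH chart d pr).get? p = d.get? p := by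
        unfold stepH
        rcases pvHouse chart pr.1 with _ | v
        · rfl
        · exact PySem.Dict.get?_insert_of_ne _ _ hne
      rcases pvHouse chart p with _ | v
      · exact hstep
      · rfl

-- condition bridge: A's "or 12" target test equals B's residue test, for houses 1..12
lemma tgt_beq (v a h : Int) (h1 : 1 ≤ h) (h2 : h ≤ 12) :
    (tgt v a == h) = (PySem.Int.mod (v + a - 1) 12 == PySem.Int.mod h 12) := by
  have hE : PySem.Int.mod (v + a - 1) 12 = (v + a - 1) % 12 :=
    PySem.Int.mod_eq_emod_of_pos (by omega)
  have hhE : PySem.Int.mod h 12 = h % 12 := PySem.Int.mod_eq_emod_of_pos (by omega)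
  unfold tgt
  rw [hE, hhE, beq_eq_beq]
  split_ifs <;> omega

-- ===== VERDICT (by name: the statement is the Claim_ definition above) =====
theorem calculate_house_aspects_py_spec : Claim_equal_calculate_house_aspects_py := by
  intro chart _
  show calculate_house_aspects_py chart = calculate_house_aspects_py_alt chart
  have hnd : (pvRules.map Prod.fst).Nodup := by decide
  -- A's fold, re-expressed through the named step functions (definitional up to foldl_ext)
  have hA2 : calculate_house_aspects_py chart
      = (pvRules.foldl (stepO chart) (dOf (fun _ => []))).items := by
    show (pvRules.foldl (fun acc pr =>
          match (PySem.Dict.mk chart).get? pr.1 with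
          | none => acc
          | some planet_pos =>
            match (PySem.Dict.mk planet_pos).get? "house" with
            | none => acc
            | some planet_house =>
              if planet_house = 0 then acc
              else pr.2.foldl (stepI pr.1 planet_house) acc) (dOf (fun _ => []))).items = _
    congr 1
    exact List.foldl_ext _ _ _ (fun acc pr _ => stepO_eq chart acc pr)
  rw [hA2, outer_fold chart pvRules (fun _ => []) (by intro pr _ h; simp) hnd]
  -- B's precomputed houses, re-expressed through stepH (definitional up to foldl_ext)
  have hH : pvAltHouses chart = pvRules.foldl (stepH chart) PySem.Dict.empty := by
    unfold pvAltHouses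
    exact List.foldl_ext _ _ _ (fun d pr _ => stepH_eq chart d pr)
  have hB : calculate_house_aspects_py_alt chart
      = (PySem.List.pyRange 1 13 1).map (fun house =>
          (house, (pvRules.filter (fun pr =>
            match (pvRules.foldl (stepH chart) PySem.Dict.empty).get? pr.1 with
            | none => false
            | some ph => pr.2.any (fun a =>
                PySem.Int.mod (ph + a - 1) 12 == PySem.Int.mod house 12))).map Prod.fst)) := by
    show (PySem.List.pyRange 1 13 1).map (fun house =>
          (house, (pvRules.filter (fun pr =>
            match (pvAltHouses chart).get? pr.1 with
            | none => false
            | some ph => pr.2.any (fun a =>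
                PySem.Int.mod (ph + a - 1) 12 == PySem.Int.mod house 12))).map Prod.fst)) = _
    rw [hH]
  rw [hB]
  have hrange : PySem.List.pyRange 1 13 1 = H12 := by decide
  rw [hrange]
  unfold dOf PySem.Dict.items
  apply List.map_congr_left
  intro h hh
  have hb : 1 ≤ h ∧ h ≤ 12 := by fin_cases hh <;> omega
  refine congrArg (Prod.mk h) ?_
  show [] ++ gather chart pvRules h = _
  rw [List.nil_append]
  unfold gather
  refine congrArg (List.map Prod.fst) (List.filter_congr ?_)
  intro pr hpr
  rw [altHouses_get chart pvRules PySem.Dict.empty pr.1 (List.mem_map_of_mem hpr) hnd]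
  rcases pvHouse chart pr.1 with _ | v
  · simp [PySem.Dict.get?_empty]
  · simp only
    refine congrArg pr.2.any ?_
    funext a
    exact tgt_beq v a h hb.1 hb.2
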